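-- pv_equiv track=rewrite | github.com/TheIcySpark/BinarySearch | Common Words.py | solve
-- ===== SOURCE A (Python) =====
-- def solve(s0, s1):
--     s0 = s0.lower()
--     s1 = s1.lower()
--     d1 = {k:1 for k in s0.split()}
--     c = 0
--     for w in s1.split():
--         if d1.get(w, 0) == 0:
--             continue
--         else:
--             c += 1
--             d1[w] = 0
--     return c
-- ===== SOURCE B (Python) =====
-- def _dedup(ws):
--     # ws is sorted; keep the first of each run of equal words
--     if not ws:
--         return []
--     head = ws[0]
--     i = 1
--     while i < len(ws) and ws[i] == head:
--         i += 1
--     return [head] + _dedup(ws[i:])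
--
--
-- def _merge_count(a, b):
--     # a, b strictly increasing; classic sorted-merge intersection count
--     if not a or not b:
--         return 0
--     if a[0] < b[0]:
--         return _merge_count(a[1:], b)
--     if b[0] < a[0]:
--         return _merge_count(a, b[1:])
--     return 1 + _merge_count(a[1:], b[1:])
--
--
-- def solve(s0, s1):
--     a = _dedup(sorted(s0.lower().split()))
--     b = _dedup(sorted(s1.lower().split()))
--     return _merge_count(a, b)
-- ===== Notes on version B (the rewrite author's own statement) =====
-- stated objective: alternative
-- what changed: Replaces A's hash-based dict-of-flags marking loop with a comparison-based algorithm: sort each word list, collapse runs of equal words, then count common words with a sorted-merge (two-pointer) intersection scan; no hash lookup or flag mutation remains.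
import Mathlib
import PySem

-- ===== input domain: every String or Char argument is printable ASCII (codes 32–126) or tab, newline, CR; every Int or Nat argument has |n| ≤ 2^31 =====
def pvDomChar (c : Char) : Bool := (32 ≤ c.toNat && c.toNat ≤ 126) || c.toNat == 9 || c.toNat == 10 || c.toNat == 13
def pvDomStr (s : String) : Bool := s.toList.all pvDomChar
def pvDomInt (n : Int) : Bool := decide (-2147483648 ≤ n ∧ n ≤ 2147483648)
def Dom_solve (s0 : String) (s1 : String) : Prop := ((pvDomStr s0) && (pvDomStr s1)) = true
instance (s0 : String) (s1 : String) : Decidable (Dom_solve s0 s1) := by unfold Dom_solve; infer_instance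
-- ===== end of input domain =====

-- B replaces A's dict-of-flags marking loop with sort + run-collapse + sorted-merge intersection count (alternative; same answer).

-- ===== PORT A =====
def solve (s0 : String) (s1 : String) : Int :=
  let s0l := PySem.Str.lower s0
  let s1l := PySem.Str.lower s1
  let d1 := (PySem.Str.split₀ s0l).foldl (fun d k => d.insert k (1 : Int)) PySem.Dict.empty
  ((PySem.Str.split₀ s1l).foldl
    (fun (st : Int × PySem.Dict String Int) w =>
      if st.2.getD w 0 == 0 then st else (st.1 + 1, st.2.insert w 0))
    ((0 : Int), d1)).1

-- ===== PORT B =====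
-- _dedup: the inner 'while ws[i] == head' advance is the dropWhile of the tail; ws[i:] is the remainder.
def pvDedup : List String → List String
  | [] => []
  | x :: xs => x :: pvDedup (xs.dropWhile (fun y => y == x))
termination_by l => l.length
decreasing_by
  have := List.length_dropWhile_le (fun y => y == x) xs
  simp only [List.length_cons]; omega

-- _merge_count: two-pointer walk over the remaining suffixes.
def pvMergeCount : List String → List String → Int
  | [], _ => 0
  | _ :: _, [] => 0
  | x :: xs, y :: ys =>
    if x < y then pvMergeCount xs (y :: ys)
    else if y < x then pvMergeCount (x :: xs) ys
    else 1 + pvMergeCount xs ys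
termination_by a b => a.length + b.length

def solve_alt (s0 : String) (s1 : String) : Int :=
  let a := pvDedup (PySem.List.sorted (PySem.Str.split₀ (PySem.Str.lower s0)) (fun x => x) false)
  let b := pvDedup (PySem.List.sorted (PySem.Str.split₀ (PySem.Str.lower s1)) (fun x => x) false)
  pvMergeCount a b

-- ===== PRECONDITION & SPEC =====
def Spec_solve (s0 : String) (s1 : String) (out : Int) : Prop := out = solve_alt s0 s1
instance (s0 : String) (s1 : String) (out : Int) : Decidable (Spec_solve s0 s1 out) := by unfold Spec_solve; infer_instance

-- ===== CLAIM (what is proved, stated in full; the proofs are below) =====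
def Claim_equal_solve : Prop := ∀ (s0 : String) (s1 : String), Dom_solve s0 s1 → Spec_solve s0 s1 (solve s0 s1)

-- ===== LEMMAS AND PROOFS =====

-- A predicate that flips from true to false at exactly one element of a duplicate-free list drops the count by one.
theorem countP_pred_switch {α : Type} (l : List α) (hl : l.Nodup) (p q : α → Bool) (w : α)
    (hw : w ∈ l) (hp : p w = true) (hq : q w = false)
    (hpq : ∀ x ∈ l, x ≠ w → p x = q x) : l.countP p = l.countP q + 1 := by
  induction l with
  | nil => cases hw
  | cons a t ih =>
    rcases List.nodup_cons.mp hl with ⟨hat, hnt⟩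
    rcases List.mem_cons.mp hw with h | h
    · subst h
      have hcong : t.countP p = t.countP q :=
        List.countP_congr (fun x hx => by
          rw [hpq x (List.mem_cons_of_mem _ hx) (fun he => hat (he ▸ hx))])
      simp [hp, hq, hcong]
    · have haw : a ≠ w := fun he => hat (he ▸ h)
      have := ih hnt h (fun x hx hxw => hpq x (List.mem_cons_of_mem _ hx) hxw)
      have hpa : p a = q a := hpq a (List.mem_cons_self) haw
      simp [List.countP_cons, hpa, this]
      omega

theorem getD_foldl_ins_not_mem (l : List String) (d : PySem.Dict String Int) (k : String)
    (h : k ∉ l) : (l.foldl (fun d k => d.insert k (1 : Int)) d).getD k 0 = d.getD k 0 := by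
  induction l generalizing d with
  | nil => rfl
  | cons a t ih =>
    have hk : k ∉ t := fun hx => h (List.mem_cons_of_mem _ hx)
    have hne : k ≠ a := fun he => h (he ▸ List.mem_cons_self)
    simp only [List.foldl_cons]
    rw [ih _ hk, PySem.Dict.getD_insert_of_ne _ 1 0 hne]

theorem getD_foldl_ins_mem (l : List String) (d : PySem.Dict String Int) (k : String)
    (h : k ∈ l) : (l.foldl (fun d k => d.insert k (1 : Int)) d).getD k 0 = 1 := by
  induction l generalizing d with
  | nil => cases h
  | cons a t ih =>
    simp only [List.foldl_cons]
    by_cases ht : k ∈ t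
    · exact ih _ ht
    · have hka : k = a := (List.mem_cons.mp h).resolve_right ht
      subst hka
      rw [getD_foldl_ins_not_mem _ _ _ ht, PySem.Dict.getD_insert_self]

-- A's marking loop counts the distinct words of the second list whose flag in d is still nonzero.
theorem loopA (w1 : List String) : ∀ (c : Int) (d : PySem.Dict String Int), d.keys.Nodup →
    ((w1.foldl
      (fun (st : Int × PySem.Dict String Int) w =>
        if st.2.getD w 0 == 0 then st else (st.1 + 1, st.2.insert w 0))
      (c, d)).1)
    = c + ((d.keys.countP (fun k => (d.getD k 0 != 0) && w1.contains k) : Nat) : Int) := by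
  induction w1 with
  | nil => intro c d _; simp
  | cons w rest ih =>
    intro c d hnd
    simp only [List.foldl_cons]
    by_cases h0 : d.getD w 0 = 0
    · rw [if_pos (by simp [h0]), ih c d hnd]
      congr 2
      apply List.countP_congr
      intro k _
      by_cases hk : k = w
      · subst hk; simp [h0]
      · simp [hk]
    · rw [if_neg (by simp [h0])]
      have hcw : d.contains w = true := by
        by_contra hc
        exact h0 (PySem.Dict.getD_of_not_contains d 0 (by simpa using hc))
      have hkeys : (d.insert w (0 : Int)).keys = d.keys :=
        PySem.Dict.keys_insert_of_contains d 0 hcw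
      have hnd' : (d.insert w (0 : Int)).keys.Nodup := hkeys ▸ hnd
      rw [ih (c + 1) _ hnd']
      rw [hkeys]
      have hswitch :
          d.keys.countP (fun k => (d.getD k 0 != 0) && (w :: rest).contains k)
            = d.keys.countP (fun k => ((d.insert w (0 : Int)).getD k 0 != 0) && rest.contains k) + 1 := by
        apply countP_pred_switch d.keys hnd _ _ w
        · exact (PySem.Dict.contains_iff_mem_keys d w).mp hcw
        · simp [h0]
        · simp [PySem.Dict.getD_insert_self]
        · intro x _ hxw
          rw [PySem.Dict.getD_insert_of_ne _ 0 0 hxw]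
          simp [hxw]
      rw [hswitch]
      push_cast
      ring

-- A on the word lists: the number of distinct words of w0 that occur in w1.
theorem solveA_lists (w0 w1 : List String) :
    ((w1.foldl
      (fun (st : Int × PySem.Dict String Int) w =>
        if st.2.getD w 0 == 0 then st else (st.1 + 1, st.2.insert w 0))
      ((0 : Int), w0.foldl (fun d k => d.insert k (1 : Int)) PySem.Dict.empty)).1)
    = (((PySem.Set.ofList w0).countP (fun k => w1.contains k) : Nat) : Int) := by
  set d1 := w0.foldl (fun d k => d.insert k (1 : Int)) PySem.Dict.empty with hd1
  have hkeys : d1.keys = PySem.Set.ofList w0 := by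
    rw [hd1, PySem.Dict.keys_foldl_insert]
    simp [PySem.Dict.keys_empty, PySem.Set.update_nil_left]
  have hnd : d1.keys.Nodup :=
    PySem.Dict.nodup_keys_foldl_insert w0 _ _ (by simp [PySem.Dict.keys_empty])
  rw [loopA w1 0 d1 hnd, hkeys]
  have hcong : (PySem.Set.ofList w0).countP (fun k => (d1.getD k 0 != 0) && w1.contains k)
      = (PySem.Set.ofList w0).countP (fun k => w1.contains k) := by
    apply List.countP_congr
    intro k hk
    have : d1.getD k 0 = 1 := getD_foldl_ins_mem w0 _ k ((PySem.Set.mem_ofList w0 k).mp hk)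
    simp [this]
  rw [hcong]
  ring

-- pvDedup preserves membership.
theorem mem_pvDedup (l : List String) (a : String) : a ∈ pvDedup l ↔ a ∈ l := by
  induction l using pvDedup.induct with
  | case1 => simp [pvDedup]
  | case2 x xs ih =>
    rw [pvDedup]
    constructor
    · intro h
      rcases List.mem_cons.mp h with h | h
      · exact h ▸ List.mem_cons_self
      · exact List.mem_cons_of_mem _ (List.dropWhile_sublist _ |>.mem (ih.mp h))
    · intro h
      rcases List.mem_cons.mp h with h | h
      · exact h ▸ List.mem_cons_self
      · rcases (List.takeWhile_append_dropWhile (p := fun y => y == x) (l := xs)) ▸ h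
          |> List.mem_append.mp with h | h
        · have := List.mem_takeWhile_imp h
          simp at this
          exact this ▸ List.mem_cons_self
        · exact List.mem_cons_of_mem _ (ih.mpr h)

-- pvDedup of a ≤-sorted list is strictly increasing.
theorem pvDedup_pairwise_lt (l : List String) (h : l.Pairwise (· ≤ ·)) :
    (pvDedup l).Pairwise (· < ·) := by
  induction l using pvDedup.induct with
  | case1 => simp [pvDedup]
  | case2 x xs ih =>
    rw [pvDedup]
    rcases List.pairwise_cons.mp h with ⟨hx, hxs⟩
    refine List.pairwise_cons.mpr ⟨?_, ih (hxs.sublist (List.dropWhile_sublist _))⟩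
    intro b hb
    have hbmem : b ∈ xs.dropWhile (fun y => y == x) := (mem_pvDedup _ b).mp hb
    -- b is in the dropWhile suffix: b ≥ x and b ≠ x would suffice; get b ≠ x from the run structure
    have hble : x ≤ b := hx b ((List.dropWhile_sublist _).mem hbmem)
    rcases lt_or_eq_of_le hble with hlt | heq
    · exact hlt
    -- if b = x then the head of the suffix ≤ b = x and the head ≠ x, contradiction with sortedness
    · exfalso
      subst heq
      -- head of dropWhile is not == x, and every element of the suffix is ≥ head
      cases hdw : xs.dropWhile (fun y => y == x) with
      | nil => rw [hdw] at hbmem; cases hbmem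
      | cons h0 t0 =>
        have hh0x : h0 ≠ x := by
          have hne' := List.head?_dropWhile_not (fun y => y == x) xs
          rw [hdw] at hne'
          simpa using hne'
        -- the suffix is pairwise ≤ and x = b is in it
        have hsuff : (h0 :: t0).Pairwise (· ≤ ·) := hdw ▸ hxs.sublist (List.dropWhile_sublist _)
        rw [hdw] at hbmem
        rcases List.mem_cons.mp hbmem with h | h
        · exact hh0x h.symm
        · -- h0 ≤ x (from pairwise, x ∈ t0) and x ≤ h0 (x ≤ every element of suffix) → h0 = x
          have h1 : h0 ≤ x := (List.pairwise_cons.mp hsuff).1 x h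
          have h2 : x ≤ h0 := hx h0 ((List.dropWhile_sublist _).mem (hdw ▸ List.mem_cons_self))
          exact hh0x (le_antisymm h1 h2)

-- The merge scan on strictly increasing lists counts the elements of a occurring in b.
theorem pvMergeCount_eq (a b : List String) (ha : a.Pairwise (· < ·)) (hb : b.Pairwise (· < ·)) :
    pvMergeCount a b = ((a.countP (fun x => b.contains x) : Nat) : Int) := by
  induction a generalizing b with
  | nil => simp [pvMergeCount]
  | cons x xs ih =>
    induction b with
    | nil => simp [pvMergeCount]
    | cons y ys ihb =>
      rcases List.pairwise_cons.mp ha with ⟨hxlt, hxs⟩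
      rcases List.pairwise_cons.mp hb with ⟨hylt, hys⟩
      rw [pvMergeCount]
      by_cases hxy : x < y
      · rw [if_pos hxy, ih (y :: ys) hxs hb]
        simp [List.countP_cons]
        exact ⟨fun h => absurd (h ▸ hxy) (lt_irrefl y),
               fun h => absurd (hxy.trans (hylt x h)) (lt_irrefl x)⟩
      · rw [if_neg hxy]
        by_cases hyx : y < x
        · rw [if_pos hyx]
          have hcong : (x :: xs).countP (fun z => (y :: ys).contains z)
              = (x :: xs).countP (fun z => ys.contains z) := by
            apply List.countP_congr
            intro z hz
            have hyz : y < z := by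
              rcases List.mem_cons.mp hz with h | h
              · exact h ▸ hyx
              · exact hyx.trans (hxlt z h)
            simp only [List.contains_eq_mem, List.mem_cons, decide_eq_true_eq]
            constructor
            · rintro (h | h)
              · exact absurd (h ▸ hyz) (lt_irrefl y)
              · exact h
            · exact Or.inr
          rw [hcong, ihb hys]
        · rw [if_neg hyx]
          have hxeqy : x = y := le_antisymm (not_lt.mp hyx) (not_lt.mp hxy)
          subst hxeqy
          have hcong : xs.countP (fun z => (x :: ys).contains z)
              = xs.countP (fun z => ys.contains z) := by
            apply List.countP_congr
            intro z hz
            have hxz : x < z := hxlt z hz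
            simp only [List.contains_eq_mem, List.mem_cons, decide_eq_true_eq]
            constructor
            · rintro (h | h)
              · exact absurd (h ▸ hxz) (lt_irrefl x)
              · exact h
            · exact Or.inr
          have h2 : (x :: xs).countP (fun z => (x :: ys).contains z)
              = xs.countP (fun z => ys.contains z) + 1 := by
            rw [List.countP_cons, hcong]
            simp [List.contains_eq_mem]
          rw [ih ys hxs hys, h2]
          push_cast
          ring

-- B on the word lists: the same distinct-common count.
theorem solveB_lists (w0 w1 : List String) :
    pvMergeCount (pvDedup (PySem.List.sorted w0 (fun x => x) false))
        (pvDedup (PySem.List.sorted w1 (fun x => x) false))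
    = (((PySem.Set.ofList w0).countP (fun k => w1.contains k) : Nat) : Int) := by
  set a := pvDedup (PySem.List.sorted w0 (fun x => x) false) with hadf
  set b := pvDedup (PySem.List.sorted w1 (fun x => x) false) with hbdf
  have hpa : a.Pairwise (· < ·) := pvDedup_pairwise_lt _ (by
    have := PySem.List.sorted_pairwise w0 (fun x => x)
    simpa using this)
  have hpb : b.Pairwise (· < ·) := pvDedup_pairwise_lt _ (by
    have := PySem.List.sorted_pairwise w1 (fun x => x)
    simpa using this)
  rw [pvMergeCount_eq a b hpa hpb]
  congr 1
  have hma : ∀ z, z ∈ a ↔ z ∈ w0 := by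
    intro z
    rw [hadf, mem_pvDedup, PySem.List.mem_sorted]
  have hmb : ∀ z, z ∈ b ↔ z ∈ w1 := by
    intro z
    rw [hbdf, mem_pvDedup, PySem.List.mem_sorted]
  have hna : a.Nodup := hpa.imp (fun h => ne_of_lt h)
  have hns : (PySem.Set.ofList w0).Nodup := PySem.Set.nodup_ofList w0
  have hperm : a.Perm (PySem.Set.ofList w0) := by
    rw [List.perm_ext_iff_of_nodup hna hns]
    intro z
    rw [hma z, PySem.Set.mem_ofList]
  rw [hperm.countP_eq]
  apply List.countP_congr
  intro k _
  simp only [List.contains_eq_mem, decide_eq_true_eq]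
  exact hmb k

-- ===== VERDICT (by name: the statement is the Claim_ definition above) =====
theorem solve_spec : Claim_equal_solve := by
  intro s0 s1 _
  unfold Spec_solve solve solve_alt
  rw [solveA_lists, solveB_lists]
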